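-- pv_equiv track=rewrite | github.com/mariabv/MariaVillafranca_labb321 | oversattning.py | overrovarsprak
-- ===== SOURCE A (Python) =====
-- def overrovarsprak(inrad):
-- 	vokaler = 'aouaeiyaoAOUaEIYao'
-- 	konsonanter = 'bcdfghjklmnpqrstvwxzBCDFGHJKLMNPQRSTVWXZ'
-- 	utr = ""
-- 	i = 0
-- 	for s in inrad:
-- 		if s in konsonanter and i == 0:
-- 			utr += s
-- 			i = 2
-- 		elif i == 0:
-- 			utr += s
-- 		else:
-- 			i -= 1
-- 	return utr
-- ===== SOURCE B (Python) =====
-- def overrovarsprak(inrad):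
--     konsonanter = 'bcdfghjklmnpqrstvwxzBCDFGHJKLMNPQRSTVWXZ'
--     kons = frozenset(konsonanter)
--     ut = []
--     i = 0
--     n = len(inrad)
--     while i < n:
--         c = inrad[i]
--         ut.append(c)
--         i += 3 if c in kons else 1
--     return ''.join(ut)
-- ===== Notes on version B (the rewrite author's own statement) =====
-- stated objective: simpler
-- what changed: Replaced A's per-character fold with a skip counter and three branches by a while loop that appends the current character and jumps the index by 3 after a consonant (1 otherwise), collecting into a list joined once at the end.
import Mathlib
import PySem

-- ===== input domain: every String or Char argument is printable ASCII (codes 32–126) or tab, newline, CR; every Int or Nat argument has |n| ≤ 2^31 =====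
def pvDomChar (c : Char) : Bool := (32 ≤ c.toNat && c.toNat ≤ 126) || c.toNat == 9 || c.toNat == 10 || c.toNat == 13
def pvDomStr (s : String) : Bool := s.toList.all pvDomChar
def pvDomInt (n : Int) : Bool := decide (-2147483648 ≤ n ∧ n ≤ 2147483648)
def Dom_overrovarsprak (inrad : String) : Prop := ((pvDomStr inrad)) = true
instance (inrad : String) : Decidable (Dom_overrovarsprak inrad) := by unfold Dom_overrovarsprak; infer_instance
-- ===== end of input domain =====

-- B decodes rövarspråk by jumping the index 3 past each consonant instead of A's per-character skip counter; objective: simpler.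


-- ===== PORT A =====
-- A scans the characters with a skip counter i: on a consonant with i = 0 it keeps the
-- character and sets i = 2; with i = 0 it keeps the character; otherwise it decrements i.
-- The accumulating Python string is carried as a List Char and packed with String.ofList at the end.
def pvKonsonanter : List Char := "bcdfghjklmnpqrstvwxzBCDFGHJKLMNPQRSTVWXZ".toList

def overrovarsprakStep (st : List Char × Int) (s : Char) : List Char × Int :=
  if pvKonsonanter.contains s ∧ st.2 = 0 then (st.1 ++ [s], 2)
  else if st.2 = 0 then (st.1 ++ [s], st.2)
  else (st.1, st.2 - 1)

def overrovarsprak (inrad : String) : String :=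
  String.ofList (inrad.toList.foldl overrovarsprakStep ([], 0)).1

-- ===== PORT B =====
-- B's while loop advances an index by 3 after a consonant and 1 otherwise; ported as the
-- corresponding recursion on the remaining characters (advancing by 3 = keep head, drop 2 more).
def overrovarsprakGo : List Char → List Char
  | [] => []
  | c :: rest =>
    if pvKonsonanter.contains c then c :: overrovarsprakGo (rest.drop 2)
    else c :: overrovarsprakGo rest
termination_by l => l.length
decreasing_by
  all_goals simp [List.length_drop]

def overrovarsprak_alt (inrad : String) : String :=
  String.ofList (overrovarsprakGo inrad.toList)

-- ===== PRECONDITION & SPEC =====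
def Spec_overrovarsprak (inrad : String) (out : String) : Prop := out = overrovarsprak_alt inrad
instance (inrad : String) (out : String) : Decidable (Spec_overrovarsprak inrad out) := by unfold Spec_overrovarsprak; infer_instance

-- ===== CLAIM (what is proved, stated in full; the proofs are below) =====
def Claim_equal_overrovarsprak : Prop := ∀ (inrad : String), Dom_overrovarsprak inrad → Spec_overrovarsprak inrad (overrovarsprak inrad)

-- ===== LEMMAS AND PROOFS =====

theorem overrovarsprakGo_nil : overrovarsprakGo [] = [] := by
  rw [overrovarsprakGo]

theorem overrovarsprakGo_cons (c : Char) (rest : List Char) :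
    overrovarsprakGo (c :: rest) =
      if pvKonsonanter.contains c then c :: overrovarsprakGo (rest.drop 2)
      else c :: overrovarsprakGo rest := by
  rw [overrovarsprakGo]

-- Invariant: folding A's step from skip counter (n : ℕ) behaves like B's recursion
-- started after dropping the n characters still to be skipped.
theorem overrovarsprak_fold_go (l : List Char) : ∀ (acc : List Char) (n : ℕ),
    (l.foldl overrovarsprakStep (acc, (n : Int))).1 = acc ++ overrovarsprakGo (l.drop n) := by
  induction l with
  | nil => intro acc n; simp [overrovarsprakGo_nil]
  | cons c rest ih =>
    intro acc n
    cases n with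
    | zero =>
      by_cases hc : c ∈ pvKonsonanter
      · simpa [overrovarsprakStep, hc, overrovarsprakGo_cons] using ih (acc ++ [c]) 2
      · simpa [overrovarsprakStep, hc, overrovarsprakGo_cons] using ih (acc ++ [c]) 0
    | succ m =>
      have h1 : ¬ (c ∈ pvKonsonanter ∧ (m : Int) + 1 = 0) := by
        rintro ⟨-, h⟩; omega
      have h2 : ¬ ((m : Int) + 1 = 0) := by omega
      have hstep : overrovarsprakStep (acc, ((m + 1 : ℕ) : Int)) c = (acc, ((m : ℕ) : Int)) := by
        simp [overrovarsprakStep, h2]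
      rw [List.foldl_cons, hstep, ih acc m, List.drop_succ_cons]

-- ===== VERDICT (by name: the statement is the Claim_ definition above) =====
theorem overrovarsprak_spec : Claim_equal_overrovarsprak := by
  intro inrad _
  unfold Spec_overrovarsprak overrovarsprak overrovarsprak_alt
  have h := overrovarsprak_fold_go inrad.toList [] 0
  simpa using congrArg String.ofList h
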